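-- pv_equiv track=rewrite | github.com/BacchusX1/financial_forecast | src/modules/feature_engineering/feature_scale_classifier.py | filter_columns_by_base_price
-- ===== SOURCE A (Python) =====
-- from typing import List, Dict, Set, Tuple
--
-- PRICE_COLUMNS = {'Close', 'Open', 'High', 'Low', 'Adj Close'}
--
-- def filter_columns_by_base_price(columns: List[str], base_price_column: str = 'Close',
--                                   allow_additional_price_columns: bool = True) -> Tuple[List[str], List[str]]:
--     """
--     Filter columns to only those derived from base_price_column.
--
--     Args:
--         columns: List of column names
--         base_price_column: The allowed price column (default: 'Close')
--         allow_additional_price_columns: If False, restrict to base column only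
--
--     Returns:
--         Tuple of (allowed_columns, dropped_columns)
--     """
--     if allow_additional_price_columns:
--         return columns, []
--
--     allowed = []
--     dropped = []
--
--     # Non-base price columns to filter out
--     other_price_cols = PRICE_COLUMNS - {base_price_column}
--
--     for col in columns:
--         is_other_price = False
--         for other_col in other_price_cols:
--             # Check if column starts with another price column name
--             if col.startswith(other_col + '_') or col == other_col:
--                 is_other_price = True
--                 break
--
--         if is_other_price:
--             dropped.append(col)
--         else:
--             allowed.append(col)
--
--     return allowed, dropped
-- ===== SOURCE B (Python) =====
-- from typing import List, Tuple
--
-- PRICE_COLUMNS = {'Close', 'Open', 'High', 'Low', 'Adj Close'}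
--
-- def filter_columns_by_base_price(columns: List[str], base_price_column: str = 'Close',
--                                   allow_additional_price_columns: bool = True) -> Tuple[List[str], List[str]]:
--     if allow_additional_price_columns:
--         return columns, []
--
--     other_price_cols = PRICE_COLUMNS - {base_price_column}
--
--     # No price-column name contains '_', so a column is derived from another
--     # price column exactly when its text before the first '_' (or the whole
--     # name, if it has no '_') is one of the other price columns.
--     def is_other_price(col):
--         return col.split('_', 1)[0] in other_price_cols
--
--     dropped = [col for col in columns if is_other_price(col)]
--     allowed = [col for col in columns if not is_other_price(col)]
--     return allowed, dropped
-- ===== Notes on version B (the rewrite author's own statement) =====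
-- stated objective: simpler
-- what changed: Replaces the nested loop (for each column, scan every other price column testing startswith/equality with break) by a single prefix computation col.split('_',1)[0] per column plus one set-membership test, and builds allowed/dropped as two comprehensions instead of an accumulator loop; correct because no price-column name contains '_'.
import Mathlib
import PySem

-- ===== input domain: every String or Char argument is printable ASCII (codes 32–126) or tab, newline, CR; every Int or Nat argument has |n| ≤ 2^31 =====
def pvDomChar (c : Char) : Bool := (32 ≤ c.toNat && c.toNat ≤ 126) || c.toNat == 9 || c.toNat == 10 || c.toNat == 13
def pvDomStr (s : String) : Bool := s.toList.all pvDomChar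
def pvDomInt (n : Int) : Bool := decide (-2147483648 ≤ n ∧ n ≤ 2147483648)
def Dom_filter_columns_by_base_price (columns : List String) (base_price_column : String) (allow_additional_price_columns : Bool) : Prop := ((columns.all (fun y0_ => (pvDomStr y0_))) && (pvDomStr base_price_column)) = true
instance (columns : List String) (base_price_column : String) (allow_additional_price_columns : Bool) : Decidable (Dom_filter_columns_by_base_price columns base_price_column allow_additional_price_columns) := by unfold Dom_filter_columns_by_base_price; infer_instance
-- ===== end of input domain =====

-- B replaces A's inner scan over the other price columns (startswith/equality with break)
-- by one split('_',1)[0] prefix per column tested for set membership, and builds the two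
-- result lists as two filters instead of an accumulator loop; objective: simpler.


-- ===== PORT A =====
-- module-level PRICE_COLUMNS = {'Close', 'Open', 'High', 'Low', 'Adj Close'}
def pvPriceColumns : PySem.Set String :=
  PySem.Set.ofList ["Close", "Open", "High", "Low", "Adj Close"]

-- A's inner for-loop over the set with break only computes the boolean
-- "some other price column matches", which is independent of the set's
-- iteration order, so it is ported as `any` over the Set's element list.
def filter_columns_by_base_price (columns : List String) (base_price_column : String) (allow_additional_price_columns : Bool) : List String × List String :=
  if allow_additional_price_columns then (columns, [])
  else
    let other_price_cols := PySem.Set.diff pvPriceColumns (PySem.Set.ofList [base_price_column])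
    columns.foldl
      (fun acc col =>
        let is_other_price :=
          other_price_cols.any (fun other_col =>
            PySem.Str.startswith col (other_col ++ "_") || col == other_col)
        if is_other_price then (acc.1, acc.2 ++ [col]) else (acc.1 ++ [col], acc.2))
      ([], [])

-- ===== PORT B =====
-- col.split('_', 1)[0]
def pvSplitPrefix (col : String) : String :=
  ((PySem.Str.splitMax? col "_" 1).getD []).headD ""

def pvIsOtherPrice (other_price_cols : PySem.Set String) (col : String) : Bool :=
  PySem.Set.contains other_price_cols (pvSplitPrefix col)

def filter_columns_by_base_price_alt (columns : List String) (base_price_column : String) (allow_additional_price_columns : Bool) : List String × List String :=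
  if allow_additional_price_columns then (columns, [])
  else
    let other_price_cols := PySem.Set.diff pvPriceColumns (PySem.Set.ofList [base_price_column])
    (columns.filter (fun col => !pvIsOtherPrice other_price_cols col),
     columns.filter (fun col => pvIsOtherPrice other_price_cols col))

-- ===== PRECONDITION & SPEC =====
def Spec_filter_columns_by_base_price (columns : List String) (base_price_column : String) (allow_additional_price_columns : Bool) (out : List String × List String) : Prop := out = filter_columns_by_base_price_alt columns base_price_column allow_additional_price_columns
instance (columns : List String) (base_price_column : String) (allow_additional_price_columns : Bool) (out : List String × List String) : Decidable (Spec_filter_columns_by_base_price columns base_price_column allow_additional_price_columns out) := by unfold Spec_filter_columns_by_base_price; infer_instance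

-- ===== CLAIM (what is proved, stated in full; the proofs are below) =====
def Claim_equal_filter_columns_by_base_price : Prop := ∀ (columns : List String) (base_price_column : String) (allow_additional_price_columns : Bool), Dom_filter_columns_by_base_price columns base_price_column allow_additional_price_columns → Spec_filter_columns_by_base_price columns base_price_column allow_additional_price_columns (filter_columns_by_base_price columns base_price_column allow_additional_price_columns)

-- ===== LEMMAS AND PROOFS =====

-- once maxsplit is exhausted (m = 0) with accumulator [b], the first piece is b
lemma pv_go_acc1 (fuel : Nat) (l cur : List Char) (b : List Char) :
    (PySem.Chars.splitOnMax.go ['_'] fuel 0 l cur [b]).headD [] = b := by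
  cases fuel <;> cases l <;> simp [PySem.Chars.splitOnMax.go]

-- the first piece of split('_', 1) is the text before the first '_'
lemma pv_go_head (fuel : Nat) :
    ∀ (l cur : List Char), l.length < fuel →
      (PySem.Chars.splitOnMax.go ['_'] fuel 1 l cur []).headD []
        = cur.reverse ++ l.takeWhile (fun c => c ≠ '_') := by
  induction fuel with
  | zero => intro l cur h; omega
  | succ f ih =>
    intro l cur h
    cases l with
    | nil => simp [PySem.Chars.splitOnMax.go]
    | cons c rest =>
      by_cases hc : c = '_'
      · subst hc
        simpa [PySem.Chars.splitOnMax.go] using pv_go_acc1 f rest [] cur.reverse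
      · have hc' : ¬ ('_' = c) := fun h' => hc h'.symm
        have := ih rest (c :: cur) (by simpa using Nat.lt_of_succ_lt_succ h)
        simpa [PySem.Chars.splitOnMax.go, hc, hc'] using this

lemma pv_prefix_toList (col : String) :
    (pvSplitPrefix col).toList = col.toList.takeWhile (fun c => c ≠ '_') := by
  have hb := PySem.Str.splitMax?_map col "_" 1
  cases hs : PySem.Str.splitMax? col "_" 1 with
  | none => rw [hs] at hb; simp [PySem.Chars.splitMax?] at hb
  | some parts =>
    rw [hs] at hb
    simp [PySem.Chars.splitMax?] at hb
    have hgo : (parts.map String.toList).headD []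
        = col.toList.takeWhile (fun c => c ≠ '_') := by
      rw [hb]
      unfold PySem.Chars.splitOnMax
      simpa using pv_go_head (col.toList.length + 1) col.toList [] (by omega)
    have hh : (parts.map String.toList).headD [] = (parts.headD "").toList := by
      cases parts <;> simp
    rw [hh] at hgo
    simpa [pvSplitPrefix, hs] using hgo

-- for a pattern w without '_': "l starts with w+'_' or equals w" ⟺ l's pre-'_' prefix is w
lemma pv_prefix_iff (l w : List Char) (hw : '_' ∉ w) :
    (w ++ ['_'] <+: l ∨ l = w) ↔ l.takeWhile (fun c => c ≠ '_') = w := by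
  constructor
  · rintro (⟨t, ht⟩ | rfl)
    · have : l = w ++ ('_' :: t) := by simpa using ht.symm
      subst this
      rw [List.takeWhile_append_of_pos (by intro a ha; simp; rintro rfl; exact hw ha)]
      simp
    · rw [List.takeWhile_eq_self_iff.mpr]
      intro a ha; simp; rintro rfl; exact hw ha
  · intro h
    rcases hd : l.dropWhile (fun c => c ≠ '_') with _ | ⟨e, ds⟩
    · right
      have := List.takeWhile_append_dropWhile (p := fun c => decide (c ≠ '_')) (l := l)
      rw [hd, h] at this; simpa using this.symm
    · left
      have hne : l.dropWhile (fun c => decide (c ≠ '_')) ≠ [] := by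
        rw [hd]; exact List.cons_ne_nil _ _
      have hE : e = '_' := by
        have hd' : l.dropWhile (fun c => !decide (c = '_')) = e :: ds := by simpa using hd
        have := List.head_dropWhile_not (fun c => decide (c ≠ '_')) (l := l) hne
        simpa [hd'] using this
      refine ⟨ds, ?_⟩
      have := List.takeWhile_append_dropWhile (p := fun c => decide (c ≠ '_')) (l := l)
      rw [hd, h, hE] at this
      simpa using this

-- every member of PRICE_COLUMNS - {base} is underscore-free
lemma pv_other_no_underscore (base oc : String)
    (h : oc ∈ PySem.Set.diff pvPriceColumns (PySem.Set.ofList [base])) :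
    '_' ∉ oc.toList := by
  have hm : oc ∈ pvPriceColumns := ((PySem.Set.mem_diff _ _ _).mp h).1
  have : oc ∈ ["Close", "Open", "High", "Low", "Adj Close"] := by
    simpa [pvPriceColumns] using hm
  fin_cases this <;> decide

-- A's per-column scan computes exactly B's prefix-membership test
lemma pv_pred_eq (base col : String) :
    ((PySem.Set.diff pvPriceColumns (PySem.Set.ofList [base])).any (fun other_col =>
        PySem.Str.startswith col (other_col ++ "_") || col == other_col))
      = pvIsOtherPrice (PySem.Set.diff pvPriceColumns (PySem.Set.ofList [base])) col := by
  rw [Bool.eq_iff_iff]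
  simp only [List.any_eq_true, pvIsOtherPrice, PySem.Set.contains, List.contains_eq_mem,
    decide_eq_true_eq]
  constructor
  · rintro ⟨oc, hoc, hmatch⟩
    have hw := pv_other_no_underscore base oc hoc
    have : col.toList.takeWhile (fun c => c ≠ '_') = oc.toList := by
      apply (pv_prefix_iff col.toList oc.toList hw).mp
      rcases Bool.or_eq_true_iff.mp hmatch with hpre | heq
      · left
        have := (PySem.Chars.startswith_iff col.toList (oc ++ "_").toList).mp (by simpa using hpre)
        simpa [String.toList_append] using this
      · right
        exact congrArg String.toList (eq_of_beq heq)
    have : pvSplitPrefix col = oc := by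
      rw [← String.toList_inj, pv_prefix_toList, this]
    rwa [this]
  · intro hmem
    refine ⟨pvSplitPrefix col, hmem, ?_⟩
    have hw := pv_other_no_underscore base _ hmem
    have hp : col.toList.takeWhile (fun c => c ≠ '_') = (pvSplitPrefix col).toList :=
      (pv_prefix_toList col).symm
    rcases (pv_prefix_iff col.toList (pvSplitPrefix col).toList (by simpa [← hp] using hw)).mpr
        (by rw [hp]) with hpre | heq
    · apply Bool.or_eq_true_iff.mpr; left
      apply (PySem.Chars.startswith_iff col.toList (pvSplitPrefix col ++ "_").toList).mpr
      simpa [String.toList_append] using hpre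
    · apply Bool.or_eq_true_iff.mpr; right
      simp [← String.toList_inj, heq]

-- the accumulator pair-loop is the pair of filters
lemma pv_fold_filter (p : String → Bool) (l : List String) :
    ∀ (a d : List String),
      l.foldl (fun acc col => if p col then (acc.1, acc.2 ++ [col]) else (acc.1 ++ [col], acc.2)) (a, d)
        = (a ++ l.filter (fun c => !p c), d ++ l.filter p) := by
  induction l with
  | nil => intro a d; simp
  | cons x xs ih =>
    intro a d
    by_cases hx : p x <;> simp [hx, ih, List.append_assoc]

-- ===== VERDICT (by name: the statement is the Claim_ definition above) =====
theorem filter_columns_by_base_price_spec : Claim_equal_filter_columns_by_base_price := by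
  intro columns base allow _
  unfold Spec_filter_columns_by_base_price
  unfold filter_columns_by_base_price filter_columns_by_base_price_alt
  cases allow with
  | true => rfl
  | false =>
    simp only [Bool.false_eq_true, if_false, pv_pred_eq]
    rw [pv_fold_filter]
    simp
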